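-- pv_equiv track=rewrite | github.com/RitaAssaf/Scripts_Thesis | generateur_card.py | unique_combinations
-- ===== SOURCE A (Python) =====
-- from itertools import combinations
--
-- def unique_combinations(nums, card=None):
-- 	result = []
-- 	n = len(nums)
--
-- 	# If card is not specified, use the full length of the list
-- 	max_len = min(card, n) if card is not None else n
--
-- 	for r in range(1, max_len + 1):
-- 		for combo in combinations(nums, r):
-- 			result.append(list(combo))
--
-- 	return result
-- ===== SOURCE B (Python) =====
-- def unique_combinations(nums, card=None):
--     n = len(nums)
--     max_len = min(card, n) if card is not None else n
--     if max_len <= 0: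
--         return []
--     buckets = [[] for _ in range(max_len)]
--
--     def dfs(rest, cur):
--         # depth-first: either take rest[0] (extending cur) or skip it; prune at max_len
--         if not rest or len(cur) == max_len:
--             return
--         cur2 = cur + [rest[0]]
--         buckets[len(cur2) - 1].append(cur2)
--         dfs(rest[1:], cur2)
--         dfs(rest[1:], cur)
--
--     dfs(nums, [])
--     return [c for b in buckets for c in b]
-- ===== Notes on version B (the rewrite author's own statement) =====
-- stated objective: alternative
-- what changed: Replaces the double loop over itertools.combinations(nums, r) for r in 1..max_len by a single pruned depth-first traversal (take/skip the head, recursing on the tail) that builds each combination incrementally and appends it to a per-size bucket, then concatenates the buckets.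
import Mathlib
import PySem

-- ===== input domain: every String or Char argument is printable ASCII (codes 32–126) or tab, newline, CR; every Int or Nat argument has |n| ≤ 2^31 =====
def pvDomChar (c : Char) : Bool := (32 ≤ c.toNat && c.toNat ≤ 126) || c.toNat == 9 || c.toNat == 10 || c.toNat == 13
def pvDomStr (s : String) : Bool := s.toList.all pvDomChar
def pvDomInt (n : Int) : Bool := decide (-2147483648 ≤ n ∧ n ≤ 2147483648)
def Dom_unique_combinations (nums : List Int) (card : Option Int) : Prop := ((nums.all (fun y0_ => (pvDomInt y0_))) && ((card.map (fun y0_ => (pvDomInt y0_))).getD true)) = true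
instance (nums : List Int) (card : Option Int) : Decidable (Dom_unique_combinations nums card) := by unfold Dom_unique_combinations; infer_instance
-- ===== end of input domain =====

-- B replaces the double loop over itertools.combinations by one pruned depth-first
-- traversal that builds every combination incrementally into per-size buckets
-- (objective: alternative decomposition, same asymptotic cost).


-- ===== PORT A =====
-- itertools.combinations(nums, r) in its documented index-lexicographic order
-- (exact: for r = 0 it yields the single empty tuple, for r > len no tuple).
def pvCombos : Nat → List Int → List (List Int)
  | 0, _ => [[]]
  | _ + 1, [] => []
  | r + 1, x :: xs => (pvCombos r xs).map (fun s => x :: s) ++ pvCombos (r + 1) xs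

def unique_combinations (nums : List Int) (card : Option Int) : List (List Int) :=
  let n : Int := nums.length
  let max_len : Int := match card with
    | some c => min c n
    | none => n
  (PySem.List.pyRange 1 (max_len + 1) 1).foldl
    (fun result r => result ++ pvCombos r.toNat nums) []

-- ===== PORT B =====
-- dfs(rest, cur): take rest[0] (appending the extended combination to its length's
-- bucket) or skip it; prune once len(cur) == m.  Buckets threaded as explicit state.
def pvDfs (m : Nat) : List Int → List Int → List (List (List Int)) → List (List (List Int))
  | [], _, b => b
  | x :: rest, cur, b =>
    if cur.length = m then b
    else
      let cur2 := cur ++ [x]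
      let b2 := b.modify (cur2.length - 1) (fun bk => bk ++ [cur2])
      pvDfs m rest cur (pvDfs m rest cur2 b2)

def unique_combinations_alt (nums : List Int) (card : Option Int) : List (List Int) :=
  let n : Int := nums.length
  let max_len : Int := match card with
    | some c => min c n
    | none => n
  if max_len ≤ 0 then []
  else (pvDfs max_len.toNat nums [] (List.replicate max_len.toNat [])).flatten

-- ===== PRECONDITION & SPEC =====
def Spec_unique_combinations (nums : List Int) (card : Option Int) (out : List (List Int)) : Prop := out = unique_combinations_alt nums card
instance (nums : List Int) (card : Option Int) (out : List (List Int)) : Decidable (Spec_unique_combinations nums card out) := by unfold Spec_unique_combinations; infer_instance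

-- ===== CLAIM (what is proved, stated in full; the proofs are below) =====
def Claim_equal_unique_combinations : Prop := ∀ (nums : List Int) (card : Option Int), Dom_unique_combinations nums card → Spec_unique_combinations nums card (unique_combinations nums card)

-- ===== LEMMAS AND PROOFS =====

-- what a dfs call starting from cur (length L) contributes to bucket k
def pvDelta (L m : Nat) (cur xs : List Int) (k : Nat) : List (List Int) :=
  if L ≤ k ∧ k < m then (pvCombos (k + 1 - L) xs).map (fun s => cur ++ s) else []

lemma pvDelta_nil (L m : Nat) (cur : List Int) (k : Nat) :
    pvDelta L m cur [] k = [] := by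
  unfold pvDelta
  split
  · rename_i h
    obtain ⟨j, hj⟩ : ∃ j, k + 1 - L = j + 1 := ⟨k - L, by omega⟩
    rw [hj]; simp [pvCombos]
  · rfl

lemma pvDelta_full (m : Nat) (cur xs : List Int) (k : Nat) (h : cur.length = m) :
    pvDelta cur.length m cur xs k = [] := by
  unfold pvDelta
  rw [if_neg]; omega

lemma pvDelta_step (L m k : Nat) (hLm : L < m) (cur : List Int) (x : Int) (rest : List Int) :
    ((if L = k then [cur ++ [x]] else []) ++ pvDelta (L + 1) m (cur ++ [x]) rest k)
      ++ pvDelta L m cur rest k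
      = pvDelta L m cur (x :: rest) k := by
  unfold pvDelta
  by_cases hk : L ≤ k ∧ k < m
  · by_cases hL : L = k
    · subst hL
      have h1 : ¬ (L + 1 ≤ L ∧ L < m) := by omega
      have h2 : L + 1 - L = 1 := by omega
      simp only [if_pos hk, if_neg h1, h2]
      simp [pvCombos]
    · obtain ⟨j, hj⟩ : ∃ j, k - L = j + 1 := ⟨k - L - 1, by omega⟩
      have h1 : L + 1 ≤ k ∧ k < m := by omega
      have h2 : k + 1 - (L + 1) = j + 1 := by omega
      have h3 : k + 1 - L = j + 2 := by omega
      simp only [if_pos hk, if_pos h1, if_neg hL, h2, h3]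
      simp [pvCombos, List.map_map, Function.comp_def, List.append_assoc]
  · have hL : ¬ L = k := by omega
    have h1 : ¬ (L + 1 ≤ k ∧ k < m) := by omega
    simp only [if_neg hk, if_neg hL, if_neg h1]
    rfl

lemma pvDfs_spec (m : Nat) (xs : List Int) : ∀ (cur : List Int) (b : List (List (List Int))),
    cur.length ≤ m →
    (pvDfs m xs cur b).length = b.length ∧
    ∀ k, (pvDfs m xs cur b)[k]? = b[k]?.map (fun bk => bk ++ pvDelta cur.length m cur xs k) := by
  induction xs with
  | nil =>
    intro cur b _
    refine ⟨rfl, fun k => ?_⟩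
    rw [pvDelta_nil, show pvDfs m [] cur b = b from rfl]
    cases b[k]? <;> simp
  | cons x rest ih =>
    intro cur b hcur
    by_cases hfull : cur.length = m
    · have hb : pvDfs m (x :: rest) cur b = b := by simp [pvDfs, hfull]
      refine ⟨by rw [hb], fun k => ?_⟩
      rw [pvDelta_full _ _ _ _ hfull, hb]
      cases b[k]? <;> simp
    · have hlt : cur.length < m := by omega
      have hc2 : (cur ++ [x]).length = cur.length + 1 := by simp
      set cur2 := cur ++ [x] with hcur2
      set b2 := b.modify (cur2.length - 1) (fun bk => bk ++ [cur2]) with hb2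
      obtain ⟨hlen1, hget1⟩ := ih cur2 b2 (by omega)
      obtain ⟨hlen2, hget2⟩ := ih cur (pvDfs m rest cur2 b2) (le_of_lt hlt)
      constructor
      · show (pvDfs m (x :: rest) cur b).length = b.length
        rw [show pvDfs m (x :: rest) cur b = pvDfs m rest cur (pvDfs m rest cur2 b2) by
          simp only [pvDfs, if_neg hfull]; rw [← hcur2, ← hb2]]
        rw [hlen2, hlen1, hb2, List.length_modify]
      · intro k
        rw [show pvDfs m (x :: rest) cur b = pvDfs m rest cur (pvDfs m rest cur2 b2) by
          simp only [pvDfs, if_neg hfull]; rw [← hcur2, ← hb2]]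
        rw [hget2, hget1]
        have hidx : cur2.length - 1 = cur.length := by omega
        rw [hb2, hidx, List.getElem?_modify]
        cases b[k]? with
        | none => rfl
        | some bk =>
          simp only [Option.map_eq_map, Option.map_some]
          congr 1
          have hS : (if cur.length = k then bk ++ [cur2] else bk)
              = bk ++ (if cur.length = k then [cur2] else []) := by split <;> simp
          rw [hS, ← pvDelta_step cur.length m k hlt cur x rest]
          simp [List.append_assoc, hcur2]

lemma pvDfs_buckets (m : Nat) (nums : List Int) :
    pvDfs m nums [] (List.replicate m ([] : List (List Int)))
      = (List.range m).map (fun k => pvCombos (k + 1) nums) := by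
  obtain ⟨hlen, hget⟩ := pvDfs_spec m nums [] (List.replicate m []) (by simp)
  apply List.ext_getElem?
  intro k
  rw [hget k]
  by_cases hk : k < m
  · rw [List.getElem?_replicate, if_pos hk, List.getElem?_map, List.getElem?_range hk]
    simp only [Option.map_some, List.nil_append, pvDelta]
    rw [if_pos ⟨Nat.zero_le k, hk⟩]
    simp
  · rw [List.getElem?_replicate, if_neg hk,
      List.getElem?_eq_none (by simpa using by omega : (List.map (fun k => pvCombos (k + 1) nums) (List.range m)).length ≤ k)]
    rfl

lemma pvFoldl_combos (nums : List Int) (M : Int) :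
    (PySem.List.pyRange 1 (M + 1) 1).foldl (fun result r => result ++ pvCombos r.toNat nums) []
      = ((List.range M.toNat).map (fun k => pvCombos (k + 1) nums)).flatten := by
  rw [PySem.List.pyRange_one, PySem.List.foldl_append_eq_flatMap]
  have h1 : (M + 1 - 1).toNat = M.toNat := by omega
  have h2 : ∀ k : Nat, ((1 : Int) + k).toNat = k + 1 := fun k => by omega
  rw [h1, List.flatMap_map, List.nil_append, ← List.flatMap_def]
  exact List.flatMap_congr (fun k _ => by simp [h2])

-- ===== VERDICT (by name: the statement is the Claim_ definition above) =====
lemma pvMain (nums : List Int) (M : Int) :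
    (PySem.List.pyRange 1 (M + 1) 1).foldl (fun result r => result ++ pvCombos r.toNat nums) []
      = (if M ≤ 0 then []
         else (pvDfs M.toNat nums [] (List.replicate M.toNat ([] : List (List Int)))).flatten) := by
  rw [pvFoldl_combos]
  by_cases h : M ≤ 0
  · rw [if_pos h]
    have : M.toNat = 0 := by omega
    simp [this]
  · rw [if_neg h, pvDfs_buckets]

theorem unique_combinations_spec : Claim_equal_unique_combinations := by
  intro nums card _
  cases card with
  | none => exact pvMain nums nums.length
  | some c => exact pvMain nums (min c nums.length)
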